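-- pv_equiv track=rewrite | github.com/atulanandnitt/questionsBank | basicDataStructure/array_list/extra/rearrange_an_array_such_that_arri_i2.py | rearrange_an_array_such_that_arri_i
-- ===== SOURCE A (Python) =====
-- def rearrange_an_array_such_that_arri_i(list1):
--     list2=[]
--     for i in range(len(list1)):
--         if i in list1:
--             list2.append(i)
--         else:
--             list2.append(-1)
--     solStr = ""
--     for item in list2:
--         solStr += str(item) + " "
--     return solStr.strip()
-- ===== SOURCE B (Python) =====
-- def rearrange_an_array_such_that_arri_i(list1):
--     n = len(list1)
--     result = [-1] * n
--     for v in list1: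
--         if 0 <= v < n:
--             result[v] = v
--     return " ".join(str(x) for x in result)
-- ===== Notes on version B (the rewrite author's own statement) =====
-- stated objective: faster
-- what changed: Replaces A's per-index membership scan (i in list1 inside a loop over range(len)) by a single scatter pass over the values into a preallocated result array of sentinel entries, and builds the output with ' '.join instead of concatenation plus strip.
import Mathlib
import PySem

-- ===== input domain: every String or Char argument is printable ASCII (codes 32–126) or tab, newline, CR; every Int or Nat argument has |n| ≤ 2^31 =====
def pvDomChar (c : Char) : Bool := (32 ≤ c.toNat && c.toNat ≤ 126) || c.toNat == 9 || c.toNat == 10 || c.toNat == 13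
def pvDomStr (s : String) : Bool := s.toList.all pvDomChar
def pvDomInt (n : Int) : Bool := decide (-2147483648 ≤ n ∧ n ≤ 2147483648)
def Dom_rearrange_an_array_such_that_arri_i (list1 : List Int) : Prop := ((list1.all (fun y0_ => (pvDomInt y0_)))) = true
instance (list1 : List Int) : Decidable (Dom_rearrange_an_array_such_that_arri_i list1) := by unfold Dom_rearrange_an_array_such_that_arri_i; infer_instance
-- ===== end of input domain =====

-- B replaces A's quadratic per-index membership scan by a single linear scatter pass
-- over the values into a preallocated sentinel-filled result array, joining with ' '.join. (objective: faster)
-- Both ports build the result string at the List Char level (PySem.Chars), since Lean's own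
-- String operations are opaque to the kernel; this is exact on the ASCII output produced here.

-- ===== PORT A =====
def rearrange_an_array_such_that_arri_i (list1 : List Int) : String :=
  -- list2 = []; for i in range(len(list1)): append i if i in list1 else -1
  let list2 : List Int :=
    (PySem.List.pyRange 0 (PySem.List.len list1) 1).foldl
      (fun acc i => if i ∈ list1 then acc ++ [i] else acc ++ [-1]) []
  -- solStr = ""; for item in list2: solStr += str(item) + " "
  let solChars : List Char :=
    list2.foldl (fun s item => s ++ PySem.Int.toChars item ++ [' ']) []
  -- return solStr.strip()
  String.ofList (PySem.Chars.strip solChars)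

-- ===== PORT B =====
def rearrange_an_array_such_that_arri_i_alt (list1 : List Int) : String :=
  -- n = len(list1); result = [-1] * n
  let n := list1.length
  -- for v in list1: if 0 <= v < n: result[v] = v
  let result : List Int :=
    list1.foldl
      (fun r v => if 0 ≤ v ∧ v < (n : Int) then PySem.List.pySetD r v v else r)
      (List.replicate n (-1))
  -- return " ".join(str(x) for x in result)
  String.ofList (PySem.Chars.join [' '] (result.map PySem.Int.toChars))

-- ===== PRECONDITION & SPEC =====
def Spec_rearrange_an_array_such_that_arri_i (list1 : List Int) (out : String) : Prop := out = rearrange_an_array_such_that_arri_i_alt list1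
instance (list1 : List Int) (out : String) : Decidable (Spec_rearrange_an_array_such_that_arri_i list1 out) := by unfold Spec_rearrange_an_array_such_that_arri_i; infer_instance

-- ===== CLAIM (what is proved, stated in full; the proofs are below) =====
def Claim_equal_rearrange_an_array_such_that_arri_i : Prop := ∀ (list1 : List Int), Dom_rearrange_an_array_such_that_arri_i list1 → Spec_rearrange_an_array_such_that_arri_i list1 (rearrange_an_array_such_that_arri_i list1)

-- ===== LEMMAS AND PROOFS =====

-- characters of str(n) are '-' or Nat.digitChar outputs, never whitespace
lemma isspace_digitChar (m : Nat) : PySem.Chars.isspace (Nat.digitChar m) = false := by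
  by_cases h0 : m = 0
  · subst h0; rfl
  by_cases h1 : m = 1
  · subst h1; rfl
  by_cases h2 : m = 2
  · subst h2; rfl
  by_cases h3 : m = 3
  · subst h3; rfl
  by_cases h4 : m = 4
  · subst h4; rfl
  by_cases h5 : m = 5
  · subst h5; rfl
  by_cases h6 : m = 6
  · subst h6; rfl
  by_cases h7 : m = 7
  · subst h7; rfl
  by_cases h8 : m = 8
  · subst h8; rfl
  by_cases h9 : m = 9
  · subst h9; rfl
  by_cases h10 : m = 10
  · subst h10; rfl
  by_cases h11 : m = 11
  · subst h11; rfl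
  by_cases h12 : m = 12
  · subst h12; rfl
  by_cases h13 : m = 13
  · subst h13; rfl
  by_cases h14 : m = 14
  · subst h14; rfl
  by_cases h15 : m = 15
  · subst h15; rfl
  rw [Nat.digitChar]
  simp only [if_neg h0, if_neg h1, if_neg h2, if_neg h3, if_neg h4, if_neg h5, if_neg h6, if_neg h7, if_neg h8, if_neg h9, if_neg h10, if_neg h11, if_neg h12, if_neg h13, if_neg h14, if_neg h15]
  rfl

lemma mem_toDigitsCore (b fuel n : Nat) (ds : List Char) (c : Char)
    (hc : c ∈ Nat.toDigitsCore b fuel n ds) : c ∈ ds ∨ ∃ m, c = Nat.digitChar m := by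
  induction fuel generalizing n ds with
  | zero => exact Or.inl hc
  | succ fuel ih =>
    rw [Nat.toDigitsCore] at hc
    by_cases h : n / b = 0
    · simp only [h, if_true] at hc
      rcases List.mem_cons.mp hc with h1 | h1
      · exact Or.inr ⟨n % b, h1⟩
      · exact Or.inl h1
    · simp only [h, if_false] at hc
      rcases ih _ _ hc with h1 | h1
      · rcases List.mem_cons.mp h1 with h2 | h2
        · exact Or.inr ⟨n % b, h2⟩
        · exact Or.inl h2
      · exact Or.inr h1

lemma toDigitsCore_ne_nil (b fuel n : Nat) (ds : List Char) (h : 0 < fuel ∨ ds ≠ []) :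
    Nat.toDigitsCore b fuel n ds ≠ [] := by
  induction fuel generalizing n ds with
  | zero =>
    rcases h with h | h
    · omega
    · exact h
  | succ fuel ih =>
    rw [Nat.toDigitsCore]
    by_cases hq : n / b = 0
    · simp [hq]
    · simp only [hq, if_false]
      exact ih _ _ (Or.inr (by simp))

lemma toChars_ne_nil (v : Int) : PySem.Int.toChars v ≠ [] := by
  unfold PySem.Int.toChars
  split_ifs
  · simp
  · exact toDigitsCore_ne_nil 10 _ _ [] (Or.inl (by omega))

lemma isspace_of_mem_toChars (v : Int) (c : Char) (hc : c ∈ PySem.Int.toChars v) :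
    PySem.Chars.isspace c = false := by
  unfold PySem.Int.toChars at hc
  have hdig : ∀ (n : Nat), c ∈ Nat.toDigits 10 n → PySem.Chars.isspace c = false := by
    intro n hn
    rcases mem_toDigitsCore 10 _ _ _ _ hn with h | ⟨m, rfl⟩
    · simp at h
    · exact isspace_digitChar m
  split_ifs at hc
  · rcases List.mem_cons.mp hc with rfl | h
    · decide
    · exact hdig _ h
  · exact hdig _ hc

-- join of nonempty non-space chunks: nonempty, non-space head, non-space last
lemma join_chunks_facts (parts : List (List Char))
    (h : ∀ p ∈ parts, p ≠ [] ∧ ∀ c ∈ p, PySem.Chars.isspace c = false) :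
    parts ≠ [] → PySem.Chars.join [' '] parts ≠ [] ∧
      (∀ c, (PySem.Chars.join [' '] parts).head? = some c → PySem.Chars.isspace c = false) ∧
      (∀ c, (PySem.Chars.join [' '] parts).getLast? = some c → PySem.Chars.isspace c = false) := by
  induction parts with
  | nil => intro h'; exact absurd rfl h'
  | cons p rest ih =>
    intro _
    obtain ⟨hpne, hpns⟩ := h p (List.mem_cons_self)
    cases rest with
    | nil =>
      rw [PySem.Chars.join_singleton]
      refine ⟨hpne, ?_, ?_⟩
      · intro c hc
        exact hpns c (List.mem_of_mem_head? hc)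
      · intro c hc
        exact hpns c (List.mem_of_mem_getLast? hc)
    | cons q rest' =>
      obtain ⟨hjne, _, hlast⟩ := ih (fun p hp => h p (List.mem_cons_of_mem _ hp)) (by simp)
      rw [PySem.Chars.join_cons_cons]
      refine ⟨by simp [hpne], ?_, ?_⟩
      · intro c hc
        cases p with
        | nil => exact absurd rfl hpne
        | cons a t =>
          simp only [List.cons_append, List.head?_cons] at hc
          exact hpns c (by simp [← Option.some_inj.mp hc])
      · intro c hc
        rw [List.append_assoc, List.getLast?_append_of_ne_nil, List.getLast?_append_of_ne_nil] at hc
        · exact hlast c hc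
        · exact hjne
        · simp

-- the A-side string loop flattened
lemma fold_str_eq_flatMap (L : List Int) :
    L.foldl (fun s item => s ++ PySem.Int.toChars item ++ [' ']) [] =
      L.flatMap (fun v => PySem.Int.toChars v ++ [' ']) := by
  have : (fun (s : List Char) item => s ++ PySem.Int.toChars item ++ [' ']) =
      (fun s item => s ++ (PySem.Int.toChars item ++ [' '])) := by
    funext s item; rw [List.append_assoc]
  rw [this, PySem.List.foldl_append_eq_flatMap, List.nil_append]

-- strip of the chunk-plus-space concatenation is the space-join of the chunks
lemma strip_flatMap_eq_join (parts : List (List Char))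
    (h : ∀ p ∈ parts, p ≠ [] ∧ ∀ c ∈ p, PySem.Chars.isspace c = false) :
    PySem.Chars.strip (parts.flatMap (· ++ [' '])) = PySem.Chars.join [' '] parts := by
  cases parts with
  | nil => rfl
  | cons p rest =>
    -- flatMap = join ++ [' ']
    have hflat : ∀ (ps : List (List Char)), ps ≠ [] →
        ps.flatMap (· ++ [' ']) = PySem.Chars.join [' '] ps ++ [' '] := by
      intro ps
      induction ps with
      | nil => intro h'; exact absurd rfl h'
      | cons q rest' ih =>
        intro _
        cases rest' with
        | nil => simp [PySem.Chars.join_singleton]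
        | cons r rest'' =>
          rw [List.flatMap_cons, ih (by simp), PySem.Chars.join_cons_cons]
          simp
    obtain ⟨hjne, hhead, hlast⟩ := join_chunks_facts (p :: rest) h (by simp)
    rw [hflat _ (by simp)]
    set j := PySem.Chars.join [' '] (p :: rest) with hj
    -- lstrip is the identity: head of j is non-space
    unfold PySem.Chars.strip PySem.Chars.lstrip PySem.Chars.rstrip
    have hlstrip : List.dropWhile PySem.Chars.isspace (j ++ [' ']) = j ++ [' '] := by
      cases hcj : j with
      | nil => exact absurd hcj hjne
      | cons a t =>
        rw [List.cons_append, List.dropWhile_cons, hhead a (by rw [hcj]; rfl)]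
        simp
    rw [hlstrip]
    -- rstrip removes exactly the trailing space
    rw [List.reverse_append]
    have h1 : [' '].reverse ++ j.reverse = ' ' :: j.reverse := by simp
    rw [h1, List.dropWhile_cons, if_pos (by rfl)]
    have hrev : List.dropWhile PySem.Chars.isspace j.reverse = j.reverse := by
      cases hcj : j.reverse with
      | nil => rfl
      | cons a t =>
        rw [List.dropWhile_cons]
        have ha : j.getLast? = some a := by
          rw [List.getLast?_eq_head?_reverse, hcj]; rfl
        rw [hlast a ha]; simp
    rw [hrev, List.reverse_reverse]

-- the string parts are valid chunks
lemma toChars_chunks (L : List Int) :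
    ∀ p ∈ L.map PySem.Int.toChars, p ≠ [] ∧ ∀ c ∈ p, PySem.Chars.isspace c = false := by
  intro p hp
  obtain ⟨v, _, rfl⟩ := List.mem_map.mp hp
  exact ⟨toChars_ne_nil v, fun c hc => isspace_of_mem_toChars v c hc⟩

-- scatter loop: length is preserved
lemma scatter_length (n : Nat) (l r : List Int) :
    (l.foldl (fun r v => if 0 ≤ v ∧ v < (n : Int) then PySem.List.pySetD r v v else r) r).length
      = r.length := by
  induction l generalizing r with
  | nil => rfl
  | cons v t ih =>
    rw [List.foldl_cons, ih]
    split_ifs with hg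
    · rw [PySem.List.pySetD_of_nonneg _ _ hg.1, List.length_set]
    · rfl

-- scatter loop: the k-th entry is k iff k occurs among the values
lemma scatter_get (n : Nat) (l r : List Int) (hr : r.length = n) (k : Nat) (hk : k < n) :
    (l.foldl (fun r v => if 0 ≤ v ∧ v < (n : Int) then PySem.List.pySetD r v v else r) r)[k]?
      = if (k : Int) ∈ l then some (k : Int) else r[k]? := by
  induction l generalizing r with
  | nil => simp
  | cons v t ih =>
    rw [List.foldl_cons]
    by_cases hv : v = (k : Int)
    · subst hv
      have hg : 0 ≤ (k : Int) ∧ (k : Int) < (n : Int) := ⟨Int.natCast_nonneg k, by exact_mod_cast hk⟩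
      rw [if_pos hg, PySem.List.pySetD_of_nonneg _ _ hg.1, Int.toNat_natCast]
      rw [ih _ (by rw [List.length_set, hr])]
      have hset : (r.set k ((k : Nat) : Int))[k]? = some ((k : Nat) : Int) := by
        rw [List.getElem?_set_self', List.getElem?_eq_getElem (by omega : k < r.length)]
        rfl
      simp [hset]
    · have hstep : (if 0 ≤ v ∧ v < (n : Int) then PySem.List.pySetD r v v else r)[k]? = r[k]? := by
        split_ifs with hg
        · rw [PySem.List.pySetD_of_nonneg _ _ hg.1]
          exact List.getElem?_set_ne (by omega)
        · rfl
      have hlen : (if 0 ≤ v ∧ v < (n : Int) then PySem.List.pySetD r v v else r).length = n := by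
        split_ifs with hg
        · rw [PySem.List.pySetD_of_nonneg _ _ hg.1, List.length_set, hr]
        · exact hr
      rw [ih _ hlen, hstep]
      have hmem : ((k : Int) ∈ v :: t) ↔ ((k : Int) ∈ t) := by
        simp [List.mem_cons, Ne.symm hv]
      simp only [hmem]

-- B's scattered list equals A's membership-mapped range
lemma scatter_eq_map_range (list1 : List Int) :
    list1.foldl
        (fun r v => if 0 ≤ v ∧ v < (list1.length : Int) then PySem.List.pySetD r v v else r)
        (List.replicate list1.length (-1))
      = (PySem.List.pyRange 0 (PySem.List.len list1) 1).map
          (fun i => if i ∈ list1 then i else -1) := by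
  apply List.ext_getElem?
  intro k
  have hlenmap : ((PySem.List.pyRange 0 (PySem.List.len list1) 1).map
      (fun i => if i ∈ list1 then i else -1)).length = list1.length := by
    rw [List.length_map, PySem.List.len_eq, PySem.List.length_pyRange_one]; omega
  by_cases hk : k < list1.length
  · rw [scatter_get list1.length list1 _ (List.length_replicate) k hk]
    rw [List.getElem?_eq_getElem (by omega : k < ((PySem.List.pyRange 0 (PySem.List.len list1) 1).map
      (fun i => if i ∈ list1 then i else -1)).length)]
    rw [List.getElem_map, PySem.List.getElem_pyRange_one]
    simp only [zero_add, List.getElem?_replicate]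
    split_ifs <;> simp_all
  · rw [List.getElem?_eq_none (by rw [scatter_length, List.length_replicate]; omega),
      List.getElem?_eq_none (by omega)]

-- ===== VERDICT (by name: the statement is the Claim_ definition above) =====
theorem rearrange_an_array_such_that_arri_i_spec : Claim_equal_rearrange_an_array_such_that_arri_i := by
  intro list1 _
  unfold Spec_rearrange_an_array_such_that_arri_i
  unfold rearrange_an_array_such_that_arri_i rearrange_an_array_such_that_arri_i_alt
  simp only []
  have hfun : (fun (acc : List Int) i => if i ∈ list1 then acc ++ [i] else acc ++ [-1]) =
      (fun acc i => acc ++ [if i ∈ list1 then i else -1]) := by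
    funext acc i; split_ifs <;> rfl
  rw [hfun, PySem.List.foldl_append_singleton_eq_map, List.nil_append,
    scatter_eq_map_range list1]
  set L := (PySem.List.pyRange 0 (PySem.List.len list1) 1).map
      (fun i => if i ∈ list1 then i else -1) with hLdef
  congr 1
  rw [fold_str_eq_flatMap]
  have hcomp : L.flatMap (fun v => PySem.Int.toChars v ++ [' ']) =
      (L.map PySem.Int.toChars).flatMap (· ++ [' ']) := by
    simp [hLdef, List.flatMap_map, Function.comp]
  rw [hcomp, strip_flatMap_eq_join _ (toChars_chunks L)]
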